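-- pv_equiv track=rewrite | github.com/open-thought/arc-agi-2 | arc-1/cot_synth/prompt_meta_optimizer.py | find_token_index
-- ===== SOURCE A (Python) =====
-- def find_token_index(tokens: list[str], sub: str) -> int:
--     combined = "".join(tokens)
--     found_index = combined.index(sub)
--     l = 0
--     i = 0
--     while l < found_index:
--         l += len(tokens[i])
--         i += 1
--     return i
-- ===== SOURCE B (Python) =====
-- def find_token_index(tokens: list[str], sub: str) -> int:
--     combined = "".join(tokens)
--     found_index = combined.index(sub)
--     prefix = []
--     total = 0
--     for t in tokens:
--         prefix.append(total)
--         total += len(t)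
--     prefix.append(total)
--     lo, hi = 0, len(prefix)
--     while lo < hi:
--         mid = (lo + hi) // 2
--         if prefix[mid] < found_index:
--             lo = mid + 1
--         else:
--             hi = mid
--     return lo
-- ===== Notes on version B (the rewrite author's own statement) =====
-- stated objective: alternative
-- what changed: The linear accumulate-and-compare walk over tokens is replaced by building a prefix-sum table of token lengths and locating the found index with a hand-written bisect_left binary search.
-- outside the precondition, e.g. on find_token_index(['ab', 'cd'], 'zz'): A raises ValueError, B raises ValueError
import Mathlib
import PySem

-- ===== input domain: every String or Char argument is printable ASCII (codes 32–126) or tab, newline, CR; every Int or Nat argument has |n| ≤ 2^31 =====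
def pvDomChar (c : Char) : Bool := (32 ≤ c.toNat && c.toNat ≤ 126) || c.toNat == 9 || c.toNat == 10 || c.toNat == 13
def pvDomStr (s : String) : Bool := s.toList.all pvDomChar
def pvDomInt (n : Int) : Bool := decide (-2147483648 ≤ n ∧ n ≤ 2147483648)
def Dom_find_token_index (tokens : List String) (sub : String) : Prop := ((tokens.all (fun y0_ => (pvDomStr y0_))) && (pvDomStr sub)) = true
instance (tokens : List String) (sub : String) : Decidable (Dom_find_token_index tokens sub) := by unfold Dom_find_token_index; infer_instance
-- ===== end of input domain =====

-- B replaces A's linear accumulate-and-compare walk by a prefix-sum table plus a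
-- hand-written binary search (bisect_left); same return value, different algorithm.

-- ===== PORT A =====
-- the while loop: l, i accumulate; tokens[i] is consumed front-to-back.
-- The [] branch corresponds to Python's IndexError on tokens[i]; it is unreachable
-- whenever sub occurs in the join (guaranteed by Pre_).
def pvGoA (ts : List String) (l : Int) (i : Int) (found : Int) : Int :=
  match ts with
  | [] => i
  | t :: rest => if l < found then pvGoA rest (l + PySem.Str.len t) (i + 1) found else i

def find_token_index (tokens : List String) (sub : String) : Int :=
  let combined := PySem.Str.join "" tokens
  let found_index := PySem.Str.find combined sub   -- combined.index(sub); Pre_ excludes the ValueError case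
  pvGoA tokens 0 0 found_index

-- ===== PORT B =====
-- the prefix-building loop of Source B: appends the running total for each token, then the final total
def pvPrefix (ts : List String) (total : Int) : List Int :=
  match ts with
  | [] => [total]
  | t :: rest => total :: pvPrefix rest (total + PySem.Str.len t)

-- Source B's hand-written bisect_left loop; pref[mid] is always in range (lo < hi ≤ len)
def pvBS (pref : List Int) (found : Int) (lo hi : Nat) : Nat :=
  if h : lo < hi then
    if pref.getD ((lo + hi) / 2) 0 < found then pvBS pref found ((lo + hi) / 2 + 1) hi
    else pvBS pref found lo ((lo + hi) / 2)
  else lo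
termination_by hi - lo
decreasing_by all_goals omega

def find_token_index_alt (tokens : List String) (sub : String) : Int :=
  let combined := PySem.Str.join "" tokens
  let found_index := PySem.Str.find combined sub
  let pref := pvPrefix tokens 0
  (pvBS pref found_index 0 pref.length : Int)

-- ===== PRECONDITION & SPEC =====
-- Pre_ excludes exactly the inputs where sub does not occur in "".join(tokens):
-- there combined.index(sub) raises ValueError in both A and B.
def Pre_find_token_index (tokens : List String) (sub : String) : Prop :=
  sub.toList <:+: (PySem.Str.join "" tokens).toList
instance (tokens : List String) (sub : String) : Decidable (Pre_find_token_index tokens sub) := by unfold Pre_find_token_index; infer_instance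

def pvWitness_find_token_index : List String × String := (["ab", "cd"], "bc")

def Spec_find_token_index (tokens : List String) (sub : String) (out : Int) : Prop := out = find_token_index_alt tokens sub
instance (tokens : List String) (sub : String) (out : Int) : Decidable (Spec_find_token_index tokens sub out) := by unfold Spec_find_token_index; infer_instance

-- ===== CLAIM (what is proved, stated in full; the proofs are below) =====
def Claim_equal_find_token_index : Prop := ∀ (tokens : List String) (sub : String), Dom_find_token_index tokens sub → Pre_find_token_index tokens sub → Spec_find_token_index tokens sub (find_token_index tokens sub)

-- ===== LEMMAS AND PROOFS =====

-- total length of the tokens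
def pvSumLens (ts : List String) : Int := (ts.map PySem.Str.len).sum

-- the value of A's loop, expressed as the number of loop iterations
def pvLin (ts : List String) (l f : Int) : Nat :=
  match ts with
  | [] => 0
  | t :: rest => if l < f then 1 + pvLin rest (l + PySem.Str.len t) f else 0

theorem pvGoA_eq (ts : List String) : ∀ (l i f : Int), pvGoA ts l i f = i + (pvLin ts l f : Int) := by
  induction ts with
  | nil => intro l i f; simp [pvGoA, pvLin]
  | cons t rest ih =>
      intro l i f
      simp only [pvGoA, pvLin]
      split
      · rw [ih]; push_cast; ring
      · simp

theorem pvPrefix_length (ts : List String) : ∀ l, (pvPrefix ts l).length = ts.length + 1 := by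
  induction ts with
  | nil => intro l; rfl
  | cons t rest ih => intro l; simp [pvPrefix, ih]

theorem str_len_nonneg (t : String) : 0 ≤ PySem.Str.len t := by
  rw [PySem.Str.len_eq]; positivity

theorem pvPrefix_ge (ts : List String) : ∀ l j, j < (pvPrefix ts l).length → l ≤ (pvPrefix ts l).getD j 0 := by
  induction ts with
  | nil =>
      intro l j hj
      simp [pvPrefix] at hj
      subst hj; simp [pvPrefix]
  | cons t rest ih =>
      intro l j hj
      cases j with
      | zero => simp [pvPrefix]
      | succ j' =>
          simp only [pvPrefix, List.length_cons, Nat.succ_lt_succ_iff] at hj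
          have := ih (l + PySem.Str.len t) j' hj
          have ht := str_len_nonneg t
          simp only [pvPrefix, List.getD_cons_succ]
          omega

theorem pvPrefix_mono (ts : List String) : ∀ l i j, i ≤ j → j < (pvPrefix ts l).length →
    (pvPrefix ts l).getD i 0 ≤ (pvPrefix ts l).getD j 0 := by
  induction ts with
  | nil =>
      intro l i j hij hj
      simp [pvPrefix] at hj
      subst hj
      interval_cases i <;> simp
  | cons t rest ih =>
      intro l i j hij hj
      cases i with
      | zero =>
          cases j with
          | zero => simp
          | succ j' =>
              simp only [pvPrefix, List.length_cons, Nat.succ_lt_succ_iff] at hj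
              have h1 := pvPrefix_ge rest (l + PySem.Str.len t) j' hj
              have ht := str_len_nonneg t
              simp only [pvPrefix, List.getD_cons_zero, List.getD_cons_succ]
              omega
      | succ i' =>
          cases j with
          | zero => omega
          | succ j' =>
              simp only [pvPrefix, List.length_cons, Nat.succ_lt_succ_iff] at hj
              simp only [pvPrefix, List.getD_cons_succ]
              exact ih _ i' j' (by omega) hj

theorem pvLin_le (ts : List String) : ∀ l f, pvLin ts l f ≤ ts.length := by
  induction ts with
  | nil => intro l f; simp [pvLin]
  | cons t rest ih =>
      intro l f
      simp only [pvLin, List.length_cons]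
      split
      · have := ih (l + PySem.Str.len t) f
        omega
      · simp

theorem pvLin_lt_f (ts : List String) : ∀ l f j, j < pvLin ts l f → (pvPrefix ts l).getD j 0 < f := by
  induction ts with
  | nil => intro l f j hj; simp [pvLin] at hj
  | cons t rest ih =>
      intro l f j hj
      simp only [pvLin] at hj
      split at hj
      · cases j with
        | zero => simpa [pvPrefix] using ‹l < f›
        | succ j' =>
            simp only [pvPrefix, List.getD_cons_succ]
            exact ih _ f j' (by omega)
      · omega

theorem pvLin_ge_f (ts : List String) : ∀ l f, f ≤ l + pvSumLens ts →
    f ≤ (pvPrefix ts l).getD (pvLin ts l f) 0 := by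
  induction ts with
  | nil =>
      intro l f hf
      simp only [pvSumLens, List.map_nil, List.sum_nil, add_zero] at hf
      simp [pvLin, pvPrefix, hf]
  | cons t rest ih =>
      intro l f hf
      simp only [pvLin]
      split
      · have hf' : f ≤ (l + PySem.Str.len t) + pvSumLens rest := by
          simp only [pvSumLens, List.map_cons, List.sum_cons] at hf ⊢
          omega
        have := ih (l + PySem.Str.len t) f hf'
        simpa [pvPrefix, Nat.add_comm 1] using this
      · simp only [pvPrefix, List.getD_cons_zero]
        omega

-- binary-search correctness: pvBS finds the (unique) first index m with f ≤ pref[m]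
theorem pvBS_eq (pref : List Int) (f : Int) (m : Nat)
    (mono : ∀ i j, i ≤ j → j < pref.length → pref.getD i 0 ≤ pref.getD j 0)
    (hm1 : ∀ j, j < m → pref.getD j 0 < f)
    (hm2 : f ≤ pref.getD m 0) (hmlen : m < pref.length) :
    ∀ n lo hi, hi - lo ≤ n → lo ≤ m → m ≤ hi → hi ≤ pref.length → pvBS pref f lo hi = m := by
  intro n
  induction n with
  | zero =>
      intro lo hi hn h1 h2 h3
      unfold pvBS
      split
      · omega
      · omega
  | succ k ih =>
      intro lo hi hn h1 h2 h3
      unfold pvBS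
      split
      · rename_i hlt
        split
        · rename_i hcmp
          -- pref[mid] < f, so m > mid
          have hmgt : (lo + hi) / 2 + 1 ≤ m := by
            by_contra hc
            have hmm : m ≤ (lo + hi) / 2 := by omega
            have := mono m ((lo + hi) / 2) hmm (by omega)
            omega
          exact ih ((lo + hi) / 2 + 1) hi (by omega) hmgt h2 h3
        · rename_i hcmp
          -- f ≤ pref[mid], so m ≤ mid
          have hmle : m ≤ (lo + hi) / 2 := by
            by_contra hc
            have := hm1 ((lo + hi) / 2) (by omega)
            omega
          exact ih lo ((lo + hi) / 2) (by omega) h1 hmle (by omega)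
      · omega

-- length of "".join(tokens) is the sum of the token lengths
theorem join_len (ts : List String) :
    (PySem.Chars.join [] (ts.map String.toList)).length = (ts.map (fun t => t.toList.length)).sum := by
  induction ts with
  | nil => simp [PySem.Chars.join_nil]
  | cons t rest ih =>
      cases rest with
      | nil => simp [PySem.Chars.join_singleton]
      | cons u rest' =>
          simp only [List.map_cons] at ih ⊢
          rw [PySem.Chars.join_cons_cons, List.append_nil]
          simp only [List.length_append, List.sum_cons] at ih ⊢
          omega

theorem pvSumLens_eq (ts : List String) :
    pvSumLens ts = ((ts.map (fun t => t.toList.length)).sum : Int) := by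
  induction ts with
  | nil => simp [pvSumLens]
  | cons t rest ih =>
      simp only [pvSumLens, List.map_cons, List.sum_cons] at ih ⊢
      rw [PySem.Str.len_eq, ih]

-- ===== VERDICT (by name: the statement is the Claim_ definition above) =====
theorem find_token_index_spec : Claim_equal_find_token_index := by
  intro tokens sub _hdom hpre
  unfold Spec_find_token_index find_token_index find_token_index_alt
  show pvGoA tokens 0 0 (PySem.Str.find (PySem.Str.join "" tokens) sub) =
    ((pvBS (pvPrefix tokens 0) (PySem.Str.find (PySem.Str.join "" tokens) sub) 0
      (pvPrefix tokens 0).length : Nat) : Int)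
  set f := PySem.Str.find (PySem.Str.join "" tokens) sub with hf
  have hf0 : 0 ≤ f := (PySem.Str.find_nonneg_iff _ sub).mpr hpre
  have hfle : f ≤ pvSumLens tokens := by
    have h1 : f ≤ ((PySem.Str.join "" tokens).toList.length : Int) := by
      rw [hf, PySem.Str.find_eq]
      exact PySem.Chars.find_le_length _ _
    have h2 : (PySem.Str.join "" tokens).toList = PySem.Chars.join [] (tokens.map String.toList) := by
      rw [PySem.Str.toList_join]; rfl
    rw [h2, join_len] at h1
    rw [pvSumLens_eq]
    refine h1.trans_eq ?_
    push_cast [List.map_map]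
    rfl
  rw [pvGoA_eq]
  set m := pvLin tokens 0 f with hm
  have hmlen : m ≤ tokens.length := pvLin_le tokens 0 f
  have hplen : (pvPrefix tokens 0).length = tokens.length + 1 := pvPrefix_length tokens 0
  have hbs := pvBS_eq (pvPrefix tokens 0) f m
    (fun i j hij hj => pvPrefix_mono tokens 0 i j hij hj)
    (fun j hj => pvLin_lt_f tokens 0 f j hj)
    (pvLin_ge_f tokens 0 f (by omega))
    (by omega)
    (pvPrefix tokens 0).length 0 (pvPrefix tokens 0).length
    (by omega) (by omega) (by omega) (by omega)
  rw [hbs]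
  simp
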